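-- pv_equiv track=rewrite | github.com/acemodou/Working-Copy | DataStructures/v2/src/arrays_strings/arrays/one_edit_away.py | one_insert_or_remove_away
-- ===== SOURCE A (Python) =====
-- def one_insert_or_remove_away(str1, str2):
--     idxOne, idxTwo = 0, 0
--     lenOne = len(str1)
--     lenTwo = len(str2)
--     found = False
--     while idxOne < lenOne and idxTwo < lenTwo:
--         if str1[idxOne] != str2[idxTwo]:
--             if found:
--                 return False
--             if lenOne > lenTwo:
--                 idxOne += 1
--             else:
--                 idxTwo += 1
--             found = True
--             continue
--         idxOne += 1
--         idxTwo += 1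
--     return True
-- ===== SOURCE B (Python) =====
-- def one_insert_or_remove_away(str1, str2):
--     n1, n2 = len(str1), len(str2)
--     i = 0
--     while i < n1 and i < n2 and str1[i] == str2[i]:
--         i += 1
--     if i == n1 or i == n2:
--         return True
--     if n1 > n2:
--         return all(x == y for x, y in zip(str1[i+1:], str2[i:]))
--     return all(x == y for x, y in zip(str1[i:], str2[i+1:]))
-- ===== Notes on version B (the rewrite author's own statement) =====
-- stated objective: simpler
-- what changed: Replaces A's single fused stateful two-pointer loop (found flag, continue) with two plain phases: a common-prefix scan, then a truncating zip comparison of the offset-aligned tails.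
import Mathlib
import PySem

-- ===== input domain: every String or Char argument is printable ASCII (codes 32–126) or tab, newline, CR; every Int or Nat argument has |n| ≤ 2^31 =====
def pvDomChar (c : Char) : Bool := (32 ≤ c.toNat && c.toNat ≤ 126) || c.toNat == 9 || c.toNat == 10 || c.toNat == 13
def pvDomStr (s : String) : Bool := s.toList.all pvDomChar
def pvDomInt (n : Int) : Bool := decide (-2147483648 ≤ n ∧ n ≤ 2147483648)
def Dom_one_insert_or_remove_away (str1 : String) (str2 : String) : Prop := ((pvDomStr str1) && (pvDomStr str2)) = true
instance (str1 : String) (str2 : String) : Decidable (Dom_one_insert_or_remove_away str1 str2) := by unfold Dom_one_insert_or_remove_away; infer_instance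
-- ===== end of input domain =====

-- B replaces A's single fused two-pointer loop with a common-prefix scan followed by a
-- truncating zip comparison of the offset tails (objective: simpler decomposition).


-- ===== PORT A =====
-- A's while loop as a recursion over the two indices and the `found` flag.
def pvALoop (s1 s2 : List Char) (lenOne lenTwo idxOne idxTwo : Nat) (found : Bool) : Bool :=
  if idxOne < lenOne ∧ idxTwo < lenTwo then
    if s1.getD idxOne ' ' ≠ s2.getD idxTwo ' ' then
      if found then false
      else if lenOne > lenTwo then pvALoop s1 s2 lenOne lenTwo (idxOne + 1) idxTwo true
      else pvALoop s1 s2 lenOne lenTwo idxOne (idxTwo + 1) true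
    else pvALoop s1 s2 lenOne lenTwo (idxOne + 1) (idxTwo + 1) found
  else true
termination_by (lenOne - idxOne) + (lenTwo - idxTwo)
decreasing_by all_goals omega

def one_insert_or_remove_away (str1 : String) (str2 : String) : Bool :=
  pvALoop str1.toList str2.toList str1.toList.length str2.toList.length 0 0 false

-- ===== PORT B =====
-- length of the common prefix (B's first while loop)
def pvPrefixLen : List Char → List Char → Nat
  | a :: as, b :: bs => if a = b then pvPrefixLen as bs + 1 else 0
  | _, _ => 0

-- all(x == y for x, y in zip(t1, t2)): truncating pairwise comparison
def pvZipEq : List Char → List Char → Bool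
  | a :: as, b :: bs => a = b && pvZipEq as bs
  | _, _ => true

def one_insert_or_remove_away_alt (str1 : String) (str2 : String) : Bool :=
  let l1 := str1.toList
  let l2 := str2.toList
  let i := pvPrefixLen l1 l2
  if i = l1.length ∨ i = l2.length then true
  else if l1.length > l2.length then pvZipEq (l1.drop (i + 1)) (l2.drop i)
  else pvZipEq (l1.drop i) (l2.drop (i + 1))

-- ===== PRECONDITION & SPEC =====
def Spec_one_insert_or_remove_away (str1 : String) (str2 : String) (out : Bool) : Prop := out = one_insert_or_remove_away_alt str1 str2
instance (str1 : String) (str2 : String) (out : Bool) : Decidable (Spec_one_insert_or_remove_away str1 str2 out) := by unfold Spec_one_insert_or_remove_away; infer_instance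

-- ===== CLAIM (what is proved, stated in full; the proofs are below) =====
def Claim_equal_one_insert_or_remove_away : Prop := ∀ (str1 : String) (str2 : String), Dom_one_insert_or_remove_away str1 str2 → Spec_one_insert_or_remove_away str1 str2 (one_insert_or_remove_away str1 str2)

-- ===== LEMMAS AND PROOFS =====


-- list-level reformulation of A's loop (state = the two remaining suffixes)
def pvListLoop (lenOne lenTwo : Nat) : List Char → List Char → Bool → Bool
  | a :: as, b :: bs, found =>
    if a ≠ b then
      if found then false
      else if lenOne > lenTwo then pvListLoop lenOne lenTwo as (b :: bs) true
      else pvListLoop lenOne lenTwo (a :: as) bs true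
    else pvListLoop lenOne lenTwo as bs found
  | _, _, _ => true
termination_by t1 t2 _ => t1.length + t2.length

theorem pvALoop_eq_listLoop (s1 s2 : List Char) (i j : Nat) (found : Bool)
    (hi : i ≤ s1.length) (hj : j ≤ s2.length) :
    pvALoop s1 s2 s1.length s2.length i j found
      = pvListLoop s1.length s2.length (s1.drop i) (s2.drop j) found := by
  by_cases h : i < s1.length ∧ j < s2.length
  · obtain ⟨h1, h2⟩ := h
    have e1 : s1.drop i = s1[i] :: s1.drop (i + 1) := List.drop_eq_getElem_cons h1
    have e2 : s2.drop j = s2[j] :: s2.drop (j + 1) := List.drop_eq_getElem_cons h2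
    have g1 : s1.getD i ' ' = s1[i] := List.getD_eq_getElem s1 ' ' h1
    have g2 : s2.getD j ' ' = s2[j] := List.getD_eq_getElem s2 ' ' h2
    rw [pvALoop, if_pos ⟨h1, h2⟩, e1, e2, pvListLoop, g1, g2]
    by_cases hne : s1[i] ≠ s2[j]
    · rw [if_pos hne, if_pos hne]
      by_cases hf : found
      · simp [hf]
      · simp only [hf, Bool.false_eq_true, if_false]
        by_cases hl : s1.length > s2.length
        · rw [if_pos hl, if_pos hl, pvALoop_eq_listLoop s1 s2 (i+1) j true (by omega) (by omega), e2]
        · rw [if_neg hl, if_neg hl, pvALoop_eq_listLoop s1 s2 i (j+1) true (by omega) (by omega), e1]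
    · rw [if_neg hne, if_neg hne,
        pvALoop_eq_listLoop s1 s2 (i+1) (j+1) found (by omega) (by omega)]
  · have hd : s1.drop i = [] ∨ s2.drop j = [] := by
      rcases Nat.lt_or_ge i s1.length with h1 | h1
      · right; have : j = s2.length := by omega
        simp [this]
      · left; simp [List.drop_eq_nil_iff.mpr h1]
    rw [pvALoop, if_neg h]
    rcases hd with hd | hd <;> rw [hd]
    · cases s2.drop j <;> simp [pvListLoop]
    · cases s1.drop i <;> simp [pvListLoop]
termination_by (s1.length - i) + (s2.length - j)
decreasing_by all_goals omega

-- once `found` is set, A's loop is exactly B's truncating zip comparison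
theorem pvListLoop_true (lenOne lenTwo : Nat) (t1 t2 : List Char) :
    pvListLoop lenOne lenTwo t1 t2 true = pvZipEq t1 t2 := by
  induction t1 generalizing t2 with
  | nil => cases t2 <;> simp [pvListLoop, pvZipEq]
  | cons a as ih =>
    cases t2 with
    | nil => simp [pvListLoop, pvZipEq]
    | cons b bs =>
      rw [pvListLoop, pvZipEq]
      by_cases hne : a = b
      · simp [hne, ih]
      · simp [hne]

-- the `found = false` phase: common prefix, then one skip, then the zip phase
theorem pvListLoop_false (lenOne lenTwo : Nat) (t1 t2 : List Char) :
    pvListLoop lenOne lenTwo t1 t2 false =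
      (let i := pvPrefixLen t1 t2
       if i = t1.length ∨ i = t2.length then true
       else if lenOne > lenTwo then pvZipEq (t1.drop (i + 1)) (t2.drop i)
       else pvZipEq (t1.drop i) (t2.drop (i + 1))) := by
  induction t1 generalizing t2 with
  | nil => cases t2 <;> simp [pvListLoop, pvPrefixLen]
  | cons a as ih =>
    cases t2 with
    | nil => simp [pvListLoop, pvPrefixLen]
    | cons b bs =>
      by_cases hab : a = b
      · subst hab
        have hp : pvPrefixLen (a :: as) (a :: bs) = pvPrefixLen as bs + 1 := by
          simp [pvPrefixLen]
        rw [pvListLoop, if_neg (by simp), ih bs]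
        simp only [hp, List.length_cons, List.drop_succ_cons]
        have hc : (pvPrefixLen as bs + 1 = as.length + 1 ∨ pvPrefixLen as bs + 1 = bs.length + 1)
            ↔ (pvPrefixLen as bs = as.length ∨ pvPrefixLen as bs = bs.length) := by omega
        simp only [hc]
      · have hp : pvPrefixLen (a :: as) (b :: bs) = 0 := by simp [pvPrefixLen, hab]
        rw [pvListLoop, if_pos (by simpa using hab)]
        simp only [Bool.false_eq_true, if_false, hp, List.length_cons]
        have hz : ¬ ((0 : Nat) = as.length + 1 ∨ (0 : Nat) = bs.length + 1) := by omega
        rw [if_neg hz]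
        by_cases hl : lenOne > lenTwo
        · simp [hl, pvListLoop_true]
        · simp [hl, pvListLoop_true]

-- ===== VERDICT (by name: the statement is the Claim_ definition above) =====
theorem one_insert_or_remove_away_spec : Claim_equal_one_insert_or_remove_away := by
  intro str1 str2 _
  unfold Spec_one_insert_or_remove_away one_insert_or_remove_away one_insert_or_remove_away_alt
  rw [pvALoop_eq_listLoop _ _ 0 0 false (Nat.zero_le _) (Nat.zero_le _)]
  simp only [List.drop_zero]
  rw [pvListLoop_false]
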